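-- pv_equiv track=rewrite | github.com/felixrauh/conference_scheduler | src/phase2.py | check_tuples_compatible
-- ===== SOURCE A (Python) =====
-- from typing import Dict, List, Set, Tuple, Optional
--
-- def check_tuples_compatible(
--     tuples: List[Tuple[str, ...]],
--     talk_presenter: Dict[str, str],
--     presenter_unavailability: Dict[str, Set[str]],
--     all_timeslots: Set[str],
--     block_type: Optional[str] = None,
--     timeslots_by_type: Optional[Dict[str, List[str]]] = None
-- ) -> Tuple[bool, Set[str]]:
--     """
--     Check if combining multiple tuples would create a feasible block.
--
--     This is used during Phase 2 partitioning to prevent grouping tuples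
--     whose combined presenter unavailabilities leave no valid timeslot.
--
--     Args:
--         tuples: List of tuples to potentially combine
--         talk_presenter: Mapping talk_id -> presenter_id
--         presenter_unavailability: Mapping presenter_id -> unavailable timeslots
--         all_timeslots: Set of all timeslot IDs
--         block_type: Optional block type for type-aware checking
--         timeslots_by_type: Optional mapping block_type -> list of timeslot IDs
--
--     Returns:
--         Tuple of (is_compatible, available_timeslots)
--     """
--     # Collect all unavailable timeslots for all presenters across all tuples
--     blocked_timeslots = set()
--
--     for ntuple in tuples:
--         for talk_id in ntuple:
--             presenter = talk_presenter.get(talk_id)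
--             if presenter:
--                 unavailable = presenter_unavailability.get(presenter, set())
--                 blocked_timeslots |= unavailable
--
--     available = all_timeslots - blocked_timeslots
--
--     # If we have block type info, further filter by matching timeslots
--     if timeslots_by_type and block_type:
--         matching_timeslots = set(timeslots_by_type.get(block_type, []))
--         available = available & matching_timeslots
--
--     is_compatible = len(available) > 0
--
--     return is_compatible, available
-- ===== SOURCE B (Python) =====
-- def check_tuples_compatible(
--     tuples,
--     talk_presenter,
--     presenter_unavailability,
--     all_timeslots,
--     block_type=None,
--     timeslots_by_type=None,
-- ):
--     # Gather the relevant presenters once, instead of unioning their blocked sets.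
--     presenters = set()
--     for ntuple in tuples:
--         for talk_id in ntuple:
--             presenter = talk_presenter.get(talk_id)
--             if presenter:
--                 presenters.add(presenter)
--
--     # Candidate timeslots: all of them, optionally restricted by block type.
--     if timeslots_by_type and block_type:
--         candidates = all_timeslots & set(timeslots_by_type.get(block_type, []))
--     else:
--         candidates = set(all_timeslots)
--
--     # Keep each candidate timeslot no gathered presenter is unavailable at.
--     available = {
--         ts
--         for ts in candidates
--         if not any(ts in presenter_unavailability.get(p, set()) for p in presenters)
--     }
--     return len(available) > 0, available
-- ===== Notes on version B (the rewrite author's own statement) =====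
-- stated objective: alternative
-- what changed: B gathers the set of relevant presenters once and decides each candidate timeslot by a per-timeslot availability test, instead of A's union of all blocked-timeslot sets followed by a set difference and intersection.
import Mathlib
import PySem

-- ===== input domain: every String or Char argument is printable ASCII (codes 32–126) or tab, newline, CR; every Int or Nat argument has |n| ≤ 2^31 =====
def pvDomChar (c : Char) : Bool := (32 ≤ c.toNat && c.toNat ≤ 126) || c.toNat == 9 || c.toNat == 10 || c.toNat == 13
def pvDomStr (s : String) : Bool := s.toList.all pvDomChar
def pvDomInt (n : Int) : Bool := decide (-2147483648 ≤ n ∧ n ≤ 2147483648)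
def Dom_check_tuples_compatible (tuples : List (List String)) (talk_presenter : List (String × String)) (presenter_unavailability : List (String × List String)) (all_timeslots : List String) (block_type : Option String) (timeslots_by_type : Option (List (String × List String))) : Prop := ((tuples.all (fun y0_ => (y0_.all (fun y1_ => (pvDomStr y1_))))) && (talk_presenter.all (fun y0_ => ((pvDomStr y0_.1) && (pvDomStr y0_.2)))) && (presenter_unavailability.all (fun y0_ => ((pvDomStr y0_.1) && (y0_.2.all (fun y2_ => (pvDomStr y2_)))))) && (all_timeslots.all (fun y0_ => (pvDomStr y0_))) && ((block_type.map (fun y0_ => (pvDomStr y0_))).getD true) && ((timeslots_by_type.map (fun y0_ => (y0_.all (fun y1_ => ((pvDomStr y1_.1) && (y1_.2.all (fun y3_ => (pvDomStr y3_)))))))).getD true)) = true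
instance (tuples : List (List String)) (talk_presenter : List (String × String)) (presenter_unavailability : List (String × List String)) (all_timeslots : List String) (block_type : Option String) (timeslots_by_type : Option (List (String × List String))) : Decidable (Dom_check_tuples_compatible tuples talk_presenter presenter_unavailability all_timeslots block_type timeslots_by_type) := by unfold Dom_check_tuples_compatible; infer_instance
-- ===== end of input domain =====

-- B replaces A's union-of-blocked-sets-then-difference by gathering the relevant presenters once
-- and filtering each candidate timeslot with a per-timeslot availability test (alternative decomposition).
-- Both ports return the available timeslots as a PySem.Set (Python set, compared as a finite set).

-- ===== PORT A =====
-- one step of A's inner loop body ('presenter = talk_presenter.get(talk_id); if presenter: blocked |= …')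
def pvBlockedStep (talk_presenter : List (String × String)) (presenter_unavailability : List (String × List String)) (blocked : PySem.Set String) (talk_id : String) : PySem.Set String :=
  match (PySem.Dict.mk talk_presenter).get? talk_id with
  | some presenter =>
      if presenter = "" then blocked
      else PySem.Set.union blocked ((PySem.Dict.mk presenter_unavailability).getD presenter [])
  | none => blocked

def check_tuples_compatible (tuples : List (List String)) (talk_presenter : List (String × String)) (presenter_unavailability : List (String × List String)) (all_timeslots : List String) (block_type : Option String) (timeslots_by_type : Option (List (String × List String))) : Bool × List String :=
  let blocked : PySem.Set String :=
    tuples.foldl (fun b ntuple => ntuple.foldl (pvBlockedStep talk_presenter presenter_unavailability) b) PySem.Set.empty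
  let available := PySem.Set.diff all_timeslots blocked
  let available :=
    match timeslots_by_type, block_type with
    | some tbt, some bt =>
        if tbt ≠ [] ∧ bt ≠ "" then  -- 'if timeslots_by_type and block_type' (both truthy)
          PySem.Set.inter available (PySem.Set.ofList ((PySem.Dict.mk tbt).getD bt []))
        else available
    | _, _ => available
  (decide (0 < available.length), available)

-- ===== PORT B =====
-- one step of B's gathering loop ('if presenter: presenters.add(presenter)')
def pvPresenterStep (talk_presenter : List (String × String)) (presenters : PySem.Set String) (talk_id : String) : PySem.Set String :=
  match (PySem.Dict.mk talk_presenter).get? talk_id with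
  | some presenter =>
      if presenter = "" then presenters
      else PySem.Set.add presenters presenter
  | none => presenters

-- B's candidate timeslots: all of them, restricted by block type when both are truthy
def pvCandidates (all_timeslots : List String) (block_type : Option String) (timeslots_by_type : Option (List (String × List String))) : List String :=
  match timeslots_by_type with
  | none => all_timeslots
  | some tbt =>
    match block_type with
    | none => all_timeslots
    | some bt =>
        if tbt ≠ [] ∧ bt ≠ "" then  -- 'if timeslots_by_type and block_type' (both truthy)
          PySem.Set.inter all_timeslots (PySem.Set.ofList ((PySem.Dict.mk tbt).getD bt []))
        else all_timeslots

def check_tuples_compatible_alt (tuples : List (List String)) (talk_presenter : List (String × String)) (presenter_unavailability : List (String × List String)) (all_timeslots : List String) (block_type : Option String) (timeslots_by_type : Option (List (String × List String))) : Bool × List String :=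
  let presenters : PySem.Set String :=
    tuples.foldl (fun ps ntuple => ntuple.foldl (pvPresenterStep talk_presenter) ps) PySem.Set.empty
  let candidates := pvCandidates all_timeslots block_type timeslots_by_type
  let available := candidates.filter (fun ts =>
    !(presenters.any (fun p => PySem.Set.contains ((PySem.Dict.mk presenter_unavailability).getD p []) ts)))
  (decide (0 < available.length), available)

-- ===== PRECONDITION & SPEC =====
def Spec_check_tuples_compatible (tuples : List (List String)) (talk_presenter : List (String × String)) (presenter_unavailability : List (String × List String)) (all_timeslots : List String) (block_type : Option String) (timeslots_by_type : Option (List (String × List String))) (out : Bool × List String) : Prop := out = check_tuples_compatible_alt tuples talk_presenter presenter_unavailability all_timeslots block_type timeslots_by_type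
instance (tuples : List (List String)) (talk_presenter : List (String × String)) (presenter_unavailability : List (String × List String)) (all_timeslots : List String) (block_type : Option String) (timeslots_by_type : Option (List (String × List String))) (out : Bool × List String) : Decidable (Spec_check_tuples_compatible tuples talk_presenter presenter_unavailability all_timeslots block_type timeslots_by_type out) := by unfold Spec_check_tuples_compatible; infer_instance

-- ===== CLAIM (what is proved, stated in full; the proofs are below) =====
def Claim_equal_check_tuples_compatible : Prop := ∀ (tuples : List (List String)) (talk_presenter : List (String × String)) (presenter_unavailability : List (String × List String)) (all_timeslots : List String) (block_type : Option String) (timeslots_by_type : Option (List (String × List String))), Dom_check_tuples_compatible tuples talk_presenter presenter_unavailability all_timeslots block_type timeslots_by_type → Spec_check_tuples_compatible tuples talk_presenter presenter_unavailability all_timeslots block_type timeslots_by_type (check_tuples_compatible tuples talk_presenter presenter_unavailability all_timeslots block_type timeslots_by_type)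

-- ===== LEMMAS AND PROOFS =====

-- invariant of the two nested loops, one inner list at a time: a timeslot is blocked iff some gathered presenter is unavailable at it
theorem pv_inv_one (tp : List (String × String)) (pu : List (String × List String)) (l : List String) (b ps : PySem.Set String)
    (h : ∀ ts, ts ∈ b ↔ ∃ p ∈ ps, ts ∈ (PySem.Dict.mk pu).getD p []) :
    ∀ ts, ts ∈ l.foldl (pvBlockedStep tp pu) b ↔ ∃ p ∈ l.foldl (pvPresenterStep tp) ps, ts ∈ (PySem.Dict.mk pu).getD p [] := by
  induction l generalizing b ps with
  | nil => exact h
  | cons x xs ih =>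
    simp only [List.foldl_cons]
    apply ih
    intro ts
    unfold pvBlockedStep pvPresenterStep
    cases hx : (PySem.Dict.mk tp).get? x with
    | none => exact h ts
    | some p =>
      by_cases hp : p = ""
      · simp only [hp, if_true]; exact h ts
      · simp only [if_neg hp]
        constructor
        · intro hm
          rcases (PySem.Set.mem_update b _ ts).1 hm with hm | hm
          · rcases (h ts).1 hm with ⟨q, hq, hqts⟩
            exact ⟨q, (PySem.Set.mem_add ps p q).2 (Or.inl hq), hqts⟩
          · exact ⟨p, (PySem.Set.mem_add ps p p).2 (Or.inr rfl), hm⟩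
        · rintro ⟨q, hq, hqts⟩
          rcases (PySem.Set.mem_add ps p q).1 hq with hq | rfl
          · exact (PySem.Set.mem_update b _ ts).2 (Or.inl ((h ts).2 ⟨q, hq, hqts⟩))
          · exact (PySem.Set.mem_update b _ ts).2 (Or.inr hqts)

theorem pv_inv (tp : List (String × String)) (pu : List (String × List String)) (tuples : List (List String)) :
    ∀ ts, ts ∈ tuples.foldl (fun b nt => nt.foldl (pvBlockedStep tp pu) b) PySem.Set.empty ↔
      ∃ p ∈ tuples.foldl (fun ps nt => nt.foldl (pvPresenterStep tp) ps) PySem.Set.empty, ts ∈ (PySem.Dict.mk pu).getD p [] := by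
  suffices H : ∀ (ts' : List (List String)) (b ps : PySem.Set String),
      (∀ ts, ts ∈ b ↔ ∃ p ∈ ps, ts ∈ (PySem.Dict.mk pu).getD p []) →
      ∀ ts, ts ∈ ts'.foldl (fun b nt => nt.foldl (pvBlockedStep tp pu) b) b ↔
        ∃ p ∈ ts'.foldl (fun ps nt => nt.foldl (pvPresenterStep tp) ps) ps, ts ∈ (PySem.Dict.mk pu).getD p [] by
    exact H tuples PySem.Set.empty PySem.Set.empty (by simp [PySem.Set.empty])
  intro ts' 
  induction ts' with
  | nil => intro b ps h; exact h
  | cons nt rest ih =>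
    intro b ps h
    simp only [List.foldl_cons]
    exact ih _ _ (pv_inv_one tp pu nt b ps h)

-- the two filter predicates agree pointwise
theorem pv_pred_eq (tp : List (String × String)) (pu : List (String × List String)) (tuples : List (List String)) (ts : String) :
    PySem.Set.contains (tuples.foldl (fun b nt => nt.foldl (pvBlockedStep tp pu) b) PySem.Set.empty) ts
      = (tuples.foldl (fun ps nt => nt.foldl (pvPresenterStep tp) ps) PySem.Set.empty).any
          (fun p => PySem.Set.contains ((PySem.Dict.mk pu).getD p []) ts) := by
  rw [Bool.eq_iff_iff]
  simp only [List.any_eq_true, PySem.Set.contains_eq_listContains,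
    List.contains_iff_mem]
  exact (pv_inv tp pu tuples ts).trans (by simp)

-- ===== VERDICT (by name: the statement is the Claim_ definition above) =====
theorem check_tuples_compatible_spec : Claim_equal_check_tuples_compatible := by
  intro tuples tp pu ats bt tbt _
  unfold Spec_check_tuples_compatible check_tuples_compatible check_tuples_compatible_alt pvCandidates
  have hfilter : PySem.Set.diff ats (tuples.foldl (fun b nt => nt.foldl (pvBlockedStep tp pu) b) PySem.Set.empty)
      = ats.filter (fun ts => !((tuples.foldl (fun ps nt => nt.foldl (pvPresenterStep tp) ps) PySem.Set.empty).any
          (fun p => PySem.Set.contains ((PySem.Dict.mk pu).getD p []) ts))) := by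
    show ats.filter _ = ats.filter _
    exact List.filter_congr (fun ts _ => by rw [pv_pred_eq tp pu tuples ts])
  cases tbt with
  | none => simp only [hfilter]
  | some d =>
    cases bt with
    | none => simp only [hfilter]
    | some s =>
      by_cases hc : d ≠ [] ∧ s ≠ ""
      · simp only [if_pos hc]
        have : PySem.Set.inter (PySem.Set.diff ats (tuples.foldl (fun b nt => nt.foldl (pvBlockedStep tp pu) b) PySem.Set.empty)) (PySem.Set.ofList ((PySem.Dict.mk d).getD s []))
            = (PySem.Set.inter ats (PySem.Set.ofList ((PySem.Dict.mk d).getD s []))).filter (fun ts => !((tuples.foldl (fun ps nt => nt.foldl (pvPresenterStep tp) ps) PySem.Set.empty).any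
              (fun p => PySem.Set.contains ((PySem.Dict.mk pu).getD p []) ts))) := by
          rw [hfilter]
          show List.filter _ (List.filter _ ats) = List.filter _ (List.filter _ ats)
          rw [List.filter_filter, List.filter_filter]
          exact List.filter_congr (fun ts _ => Bool.and_comm _ _)
        simp only [this]
      · simp only [if_neg hc, hfilter]
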